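-- pv_equiv track=rewrite | github.com/Loskiz/AS_CS_Homework | June 3 Monday 2019/画图.py | upperLeftTriangle
-- ===== SOURCE A (Python) =====
-- from copy import deepcopy
--
-- def upperLeftTriangle(image):
--     # perform a deep copy, so we won't mess up with the image passed into this function
--     image = deepcopy(image)
--     # -------------- do whatever you want to "image" -----------
--
--     k=0
--     for i in range(len(image)):
--         for j in range(len(image[i])-k):
--             image[i][j]=255
--         k+=1
--     image.reverse()
--     for m in range(len(image)):
--         image[m].reverse()
--     # ----------------------------------------------------------
--     return image
-- ===== SOURCE B (Python) =====
-- def upperLeftTriangle(image):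
--     # Build the result directly in its final orientation, one pass, no .reverse():
--     # original row i ends up at output position n-1-i, with its last max(0, len(r)-i)
--     # cells set to 255 and the rest taken from r in reversed order.
--     out = []
--     for i, r in enumerate(image):
--         c = max(0, len(r) - i)
--         out.insert(0, list(reversed(r[c:])) + [255] * c)
--     return out
-- ===== Notes on version B (the rewrite author's own statement) =====
-- stated objective: alternative
-- what changed: Instead of mutating a deep copy in place (set a shrinking prefix of each row to 255, then reverse the row list and every row), B assembles the result in a single pass directly in final orientation: for each original row it builds the already-reversed row (reversed kept suffix followed by the 255 block) and prepends it, so no in-place assignment and no reversal pass occurs.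
import Mathlib
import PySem

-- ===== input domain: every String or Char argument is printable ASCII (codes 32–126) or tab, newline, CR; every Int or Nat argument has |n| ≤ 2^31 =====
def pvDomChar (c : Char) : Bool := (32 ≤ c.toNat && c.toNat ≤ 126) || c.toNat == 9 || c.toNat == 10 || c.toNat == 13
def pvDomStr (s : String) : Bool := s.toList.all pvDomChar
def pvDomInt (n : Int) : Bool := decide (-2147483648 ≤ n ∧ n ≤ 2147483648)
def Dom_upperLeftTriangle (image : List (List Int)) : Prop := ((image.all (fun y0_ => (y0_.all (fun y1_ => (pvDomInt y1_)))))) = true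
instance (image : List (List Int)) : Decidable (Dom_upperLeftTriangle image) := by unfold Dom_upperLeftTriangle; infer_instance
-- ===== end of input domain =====

-- B builds the result in final orientation in one pass (prepending already-reversed
-- rows) instead of A's mutate-prefix-then-double-reverse; same cost, different shape.
-- A deep-copies its argument, so neither version mutates the caller's lists.

-- ===== PORT A =====
-- Literal port of A: set indices 0..len(row)-1-k of row i=k to 255 (Nat subtraction
-- matches Python's empty range(len(row)-k) when k exceeds the row length, and
-- range(len(image)) is a list of nonnegative indices, rendered as List.range),
-- then reverse the row list and reverse each row in place.
def upperLeftTriangle (image : List (List Int)) : List (List Int) :=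
  let img1 := (List.range image.length).foldl
    (fun img i =>
      img.set i ((List.range ((img.getD i []).length - i)).foldl
        (fun r j => r.set j 255) (img.getD i [])))
    image
  let img2 := img1.reverse
  (List.range img2.length).foldl (fun im m => im.set m ((im.getD m []).reverse)) img2

-- ===== PORT B =====
-- Literal port of Source B: one pass over enumerate(image); c = max(0, len(r)-i);
-- prepend list(reversed(r[c:])) + [255]*c (out.insert(0, …) is a cons).
def upperLeftTriangle_alt (image : List (List Int)) : List (List Int) :=
  (PySem.List.enumerate image).foldl
    (fun out p =>
      let c : Int := max 0 ((p.2.length : Int) - p.1)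
      ((PySem.List.slice p.2 (some c) none).reverse ++ List.replicate c.toNat 255) :: out)
    []

-- ===== PRECONDITION & SPEC =====
def Spec_upperLeftTriangle (image : List (List Int)) (out : List (List Int)) : Prop := out = upperLeftTriangle_alt image
instance (image : List (List Int)) (out : List (List Int)) : Decidable (Spec_upperLeftTriangle image out) := by unfold Spec_upperLeftTriangle; infer_instance

-- ===== CLAIM (what is proved, stated in full; the proofs are below) =====
def Claim_equal_upperLeftTriangle : Prop := ∀ (image : List (List Int)), Dom_upperLeftTriangle image → Spec_upperLeftTriangle image (upperLeftTriangle image)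

-- ===== LEMMAS AND PROOFS =====

-- rows transformed by g with a running index starting at s
def rowsFrom (g : Nat → List Int → List Int) : Nat → List (List Int) → List (List Int)
  | _, [] => []
  | s, r :: rs => g s r :: rowsFrom g (s + 1) rs

-- A's row result: prefix of c = len - i cells set to 255
def gA (i : Nat) (r : List Int) : List Int :=
  List.replicate (r.length - i) 255 ++ r.drop (r.length - i)

-- B's row result: already reversed
def gB (i : Nat) (r : List Int) : List Int :=
  (r.drop (r.length - i)).reverse ++ List.replicate (r.length - i) 255

lemma fold_set_eq (c : Nat) (r : List Int) (h : c ≤ r.length) :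
    (List.range c).foldl (fun s j => s.set j 255) r
      = List.replicate c 255 ++ r.drop c := by
  induction c with
  | zero => simp
  | succ n ih =>
    rw [List.range_succ, List.foldl_append, ih (by omega)]
    simp only [List.foldl_cons, List.foldl_nil]
    rw [List.set_append_right _ _ (by simp)]
    rw [List.drop_eq_getElem_cons (show n < r.length by omega)]
    simp [List.replicate_succ' (n := n), List.append_assoc]
    rw [List.drop_eq_getElem_cons (show n < r.length by omega)]
    rfl

lemma foldl_set_aux (g : Nat → List Int → List Int) :
    ∀ (xs pre : List (List Int)),
      ((List.range xs.length).map (· + pre.length)).foldl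
          (fun ys i => ys.set i (g i (ys.getD i []))) (pre ++ xs)
        = pre ++ rowsFrom g pre.length xs := by
  intro xs
  induction xs with
  | nil => intro pre; simp [rowsFrom]
  | cons x t ih =>
    intro pre
    rw [show (x :: t).length = t.length + 1 from rfl, List.range_succ_eq_map]
    simp only [List.map_cons, List.map_map, List.foldl_cons, Nat.zero_add]
    have hget : (pre ++ x :: t).getD pre.length [] = x := by
      simp [List.getD_eq_getElem?_getD]
    have hset : (pre ++ x :: t).set pre.length (g pre.length x)
        = (pre ++ [g pre.length x]) ++ t := by
      rw [List.set_append_right _ _ (le_refl _)]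
      simp
    rw [hget, hset]
    have hfun : ((fun i => i + pre.length) ∘ Nat.succ)
        = (fun i => i + (pre ++ [g pre.length x]).length) := by
      funext k; simp; omega
    rw [hfun, ih (pre ++ [g pre.length x])]
    simp [rowsFrom, List.append_assoc]

lemma foldl_set_eq (g : Nat → List Int → List Int) (xs : List (List Int)) :
    (List.range xs.length).foldl (fun ys i => ys.set i (g i (ys.getD i []))) xs
      = rowsFrom g 0 xs := by
  have h := foldl_set_aux g xs []
  simpa using h

lemma rowsFrom_const (f : List Int → List Int) :
    ∀ (s : Nat) (xs : List (List Int)), rowsFrom (fun _ r => f r) s xs = xs.map f := by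
  intro s xs
  induction xs generalizing s with
  | nil => simp [rowsFrom]
  | cons x t ih => simp [rowsFrom, ih]

lemma map_rowsFrom (f : List Int → List Int) (g : Nat → List Int → List Int) :
    ∀ (s : Nat) (xs : List (List Int)),
      (rowsFrom g s xs).map f = rowsFrom (fun i r => f (g i r)) s xs := by
  intro s xs
  induction xs generalizing s with
  | nil => simp [rowsFrom]
  | cons x t ih => simp [rowsFrom, ih]

lemma portA_eq (image : List (List Int)) :
    upperLeftTriangle image = ((rowsFrom gA 0 image).reverse).map (·.reverse) := by
  show (List.range (((List.range image.length).foldl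
      (fun img i =>
        img.set i ((List.range ((img.getD i []).length - i)).foldl
          (fun r j => r.set j 255) (img.getD i [])))
      image).reverse.length)).foldl
      (fun im m => im.set m ((im.getD m []).reverse))
      (((List.range image.length).foldl
        (fun img i =>
          img.set i ((List.range ((img.getD i []).length - i)).foldl
            (fun r j => r.set j 255) (img.getD i [])))
        image).reverse)
    = ((rowsFrom gA 0 image).reverse).map (·.reverse)
  have hg : (fun (i : Nat) (r : List Int) =>
      (List.range (r.length - i)).foldl (fun s j => s.set j 255) r) = gA := by
    funext i r
    exact fold_set_eq (r.length - i) r (by omega)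
  have h1 : (List.range image.length).foldl
      (fun img i =>
        img.set i ((List.range ((img.getD i []).length - i)).foldl
          (fun r j => r.set j 255) (img.getD i [])))
      image = rowsFrom gA 0 image := by
    have := foldl_set_eq
      (fun i r => (List.range (r.length - i)).foldl (fun s j => s.set j 255) r) image
    rw [hg] at this
    exact this
  rw [h1]
  rw [foldl_set_eq (fun _ r => r.reverse) ((rowsFrom gA 0 image).reverse)]
  rw [rowsFrom_const]

lemma portB_aux :
    ∀ (xs : List (List Int)) (s : Nat) (acc : List (List Int)),
      (PySem.List.enumerate xs (s : Int)).foldl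
        (fun out p =>
          let c : Int := max 0 ((p.2.length : Int) - p.1)
          ((PySem.List.slice p.2 (some c) none).reverse ++ List.replicate c.toNat 255) :: out)
        acc
      = (rowsFrom gB s xs).reverse ++ acc := by
  intro xs
  induction xs with
  | nil => intro s acc; simp [PySem.List.enumerate_nil, rowsFrom]
  | cons x t ih =>
    intro s acc
    rw [PySem.List.enumerate_cons, List.foldl_cons]
    have hc : max 0 ((x.length : Int) - (s : Int)) = ((x.length - s : Nat) : Int) := by
      omega
    have hrow : ((PySem.List.slice x (some (max 0 ((x.length : Int) - (s : Int)))) none).reverse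
        ++ List.replicate (max 0 ((x.length : Int) - (s : Int))).toNat 255) = gB s x := by
      rw [hc, PySem.List.slice_from_natCast]
      simp [gB]
    have hs : (s : Int) + 1 = ((s + 1 : Nat) : Int) := by push_cast; ring
    rw [hs]
    simp only [hrow]
    rw [ih (s+1) (gB s x :: acc)]
    simp [rowsFrom]

lemma portB_eq (image : List (List Int)) :
    upperLeftTriangle_alt image = (rowsFrom gB 0 image).reverse := by
  unfold upperLeftTriangle_alt
  have h := portB_aux image 0 []
  simpa using h

-- ===== VERDICT (by name: the statement is the Claim_ definition above) =====
theorem upperLeftTriangle_spec : Claim_equal_upperLeftTriangle := by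
  intro image _
  unfold Spec_upperLeftTriangle
  rw [portA_eq, portB_eq, List.map_reverse, map_rowsFrom]
  have : (fun (i : Nat) (r : List Int) => (gA i r).reverse) = gB := by
    funext i r
    simp [gA, gB, List.reverse_append]
  rw [this]
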